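-- pv_equiv track=rewrite | github.com/mod96/hiddenlayer | CodingTestExamples/Programmers/2018_etc/Matching&Removing.py | solution
-- ===== SOURCE A (Python) =====
-- from collections import deque
--
-- def solution(s):
--     stack = deque()
--     for elt in s:
--         if stack and stack[-1] == elt:
--             stack.pop()
--         else:
--             stack.append(elt)
--
--     if stack:
--         return 0
--     else:
--         return 1
-- ===== SOURCE B (Python) =====
-- def _pass(t):
--     # one left-to-right sweep: greedily drop adjacent equal pairs, keep the rest
--     out = []
--     i = 0
--     while i < len(t):
--         if i + 1 < len(t) and t[i] == t[i + 1]: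
--             i += 2
--         else:
--             out.append(t[i])
--             i += 1
--     return ''.join(out)
--
-- def solution(s):
--     t = s
--     while True:
--         u = _pass(t)
--         if len(u) == len(t):
--             return 0 if t else 1
--         t = u
-- ===== Notes on version B (the rewrite author's own statement) =====
-- stated objective: alternative
-- what changed: Replaces the single-pass stack with a repeated-sweep reduction: each sweep greedily deletes all left-to-right adjacent equal pairs, repeated until a sweep removes nothing, then emptiness is tested (correct because any order of adjacent-pair removal yields the same result).
import Mathlib
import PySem

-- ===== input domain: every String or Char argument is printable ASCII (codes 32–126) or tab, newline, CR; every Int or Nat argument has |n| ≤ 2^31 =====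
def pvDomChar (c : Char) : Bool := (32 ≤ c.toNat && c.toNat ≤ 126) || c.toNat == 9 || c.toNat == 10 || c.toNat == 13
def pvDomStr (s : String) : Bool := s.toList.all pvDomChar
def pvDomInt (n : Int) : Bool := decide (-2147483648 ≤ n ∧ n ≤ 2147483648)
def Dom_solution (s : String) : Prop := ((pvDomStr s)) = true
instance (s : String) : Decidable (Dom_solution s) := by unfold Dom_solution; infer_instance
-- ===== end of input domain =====

-- B replaces A's single-pass stack with a repeated-sweep reduction (each sweep greedily deletes
-- the left-to-right adjacent equal pairs, until a sweep removes nothing, then test emptiness);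
-- an alternative algorithm, not claimed faster.


-- ===== PORT A =====
-- one loop step: pop the matching top, otherwise push (stack head = deque's last element)
def stepA (st : List Char) (elt : Char) : List Char :=
  match st with
  | top :: rest => if top = elt then rest else elt :: top :: rest
  | [] => [elt]

def solution (s : String) : Int :=
  let stack := s.toList.foldl stepA []
  if stack.isEmpty then 1 else 0

-- ===== PORT B =====
-- one sweep of Source B's `_pass`: greedily drop adjacent equal pairs left to right, keep the rest
def sweep : List Char → List Char
  | [] => []
  | [a] => [a]
  | a :: b :: rest => if a = b then sweep rest else a :: sweep (b :: rest)

theorem sweep_length_le (t : List Char) : (sweep t).length ≤ t.length := by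
  induction t using sweep.induct with
  | case1 => simp [sweep]
  | case2 => simp [sweep]
  | case3 b rest ih => simp only [sweep]; simp; omega
  | case4 a b rest hab ih => simp only [sweep, if_neg hab]; simp at ih ⊢; omega

-- the while loop of Source B's `solution`
def reduceLoop (t : List Char) : List Char :=
  let u := sweep t
  if u.length = t.length then t else reduceLoop u
termination_by t.length
decreasing_by exact Nat.lt_of_le_of_ne (sweep_length_le t) (by assumption)

def solution_alt (s : String) : Int :=
  if (reduceLoop s.toList).isEmpty then 1 else 0

-- ===== PRECONDITION & SPEC =====
def Spec_solution (s : String) (out : Int) : Prop := out = solution_alt s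
instance (s : String) (out : Int) : Decidable (Spec_solution s out) := by unfold Spec_solution; infer_instance

-- ===== CLAIM (what is proved, stated in full; the proofs are below) =====
def Claim_equal_solution : Prop := ∀ (s : String), Dom_solution s → Spec_solution s (solution s)

-- ===== LEMMAS AND PROOFS =====

-- the stack never holds two equal adjacent elements
theorem stepA_chain {st : List Char} {c : Char} (h : st.IsChain (· ≠ ·)) :
    (stepA st c).IsChain (· ≠ ·) := by
  match st with
  | [] => exact List.isChain_singleton _
  | top :: rest =>
    simp only [stepA]
    split
    · exact h.tail
    · rename_i hne
      exact List.isChain_cons.mpr ⟨by intro y hy; simp at hy; subst hy; exact fun hc => hne hc.symm, h⟩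

-- feeding the same character twice is the identity on adjacent-distinct stacks
theorem stepA_cancel {st : List Char} {c : Char} (h : st.IsChain (· ≠ ·)) :
    stepA (stepA st c) c = st := by
  match st with
  | [] => simp [stepA]
  | top :: rest =>
    by_cases htc : top = c
    · subst htc
      match rest with
      | [] => simp [stepA]
      | r :: rest' =>
        have hne : top ≠ r := (List.isChain_cons.mp h).1 r rfl
        simp [stepA, Ne.symm hne]
    · simp [stepA, htc]

-- a sweep does not change the final stack
theorem foldl_stepA_sweep {t st : List Char} (h : st.IsChain (· ≠ ·)) :
    t.foldl stepA st = (sweep t).foldl stepA st := by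
  induction t using sweep.induct generalizing st with
  | case1 => rfl
  | case2 => rfl
  | case3 b rest ih =>
    simp only [sweep, if_pos, List.foldl_cons]
    rw [stepA_cancel h]
    exact ih h
  | case4 a b rest hab ih =>
    simp only [sweep, if_neg hab, List.foldl_cons]
    exact ih (stepA_chain h)

-- a sweep that removes nothing means the string has no adjacent equal pair
theorem chain_of_sweep_length {t : List Char} (h : (sweep t).length = t.length) :
    t.IsChain (· ≠ ·) := by
  induction t using sweep.induct with
  | case1 => exact List.isChain_nil
  | case2 => exact List.isChain_singleton _
  | case3 b rest ih =>
    exfalso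
    have := sweep_length_le rest
    simp [sweep] at h
    omega
  | case4 a b rest hab ih =>
    simp [sweep, hab] at h
    have hc := ih (by simp; omega)
    exact List.isChain_cons.mpr ⟨by intro y hy; simp at hy; subst hy; exact hab, hc⟩

-- a pair-free string pushes every character, so the stack is its reverse
theorem foldl_stepA_pairfree {t st : List Char} (h : t.IsChain (· ≠ ·))
    (hhd : ∀ a b, st.head? = some a → t.head? = some b → a ≠ b) :
    t.foldl stepA st = t.reverse ++ st := by
  induction t generalizing st with
  | nil => simp
  | cons c t ih =>
    have hstep : stepA st c = c :: st := by
      match st with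
      | [] => simp [stepA]
      | top :: rest =>
        have : top ≠ c := hhd top c rfl rfl
        simp [stepA, this]
    rw [List.foldl_cons, hstep, ih h.tail]
    · simp
    · intro a b ha hb
      cases ha
      exact fun hab => (List.isChain_cons.mp h).1 b hb hab

-- unfolded equation of the loop
theorem reduceLoop_eq (t : List Char) :
    reduceLoop t = if (sweep t).length = t.length then t else reduceLoop (sweep t) := by
  rw [reduceLoop]

-- the stack of A equals the reverse of B's fully reduced string
theorem foldl_stepA_reduceLoop (t : List Char) :
    t.foldl stepA [] = (reduceLoop t).reverse := by
  induction t using reduceLoop.induct with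
  | case1 t u h =>
    rw [reduceLoop_eq, if_pos h]
    rw [foldl_stepA_pairfree (chain_of_sweep_length h) (by simp)]
    simp
  | case2 t u h ih =>
    rw [reduceLoop_eq, if_neg h]
    rw [foldl_stepA_sweep List.isChain_nil, ih]

-- ===== VERDICT (by name: the statement is the Claim_ definition above) =====
theorem solution_spec : Claim_equal_solution := by
  intro s _
  unfold Spec_solution solution solution_alt
  rw [foldl_stepA_reduceLoop]
  simp
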